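-- pv_equiv track=rewrite | github.com/dathong/AdaAX | dfa_yelp/gen_rules_cluster_dfs.py | countFreq1
-- ===== SOURCE A (Python) =====
-- def countFreq1(points,suff):
--     d1,d2 = {},{}
--     for p in points:
--         k = list(suff[p].keys())[0]
--         v = suff[p][k]
--         # [k,v] = list(prefixes[p].keys())
--         if v in d1:
--             d1[v]+=1
--             d2[v].append(p)
--         else:
--             d1[v] = 1
--             d2[v] = [p]
--     return d1,d2
-- ===== SOURCE B (Python) =====
-- def countFreq1(points, suff):
--     vals = [suff[p][list(suff[p].keys())[0]] for p in points]
--     order = list(dict.fromkeys(vals))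
--     d1 = {v: vals.count(v) for v in order}
--     d2 = {v: [p for p, w in zip(points, vals) if w == v] for v in order}
--     return d1, d2
-- ===== Notes on version B (the rewrite author's own statement) =====
-- stated objective: alternative
-- what changed: B replaces A's single-pass dict maintenance (membership branch, inline counter, in-place appends) by a staged algorithm: first materialise the list of first-suffix values, dedup it to get the key order, then build each group by rescanning (vals.count / a filtering comprehension per distinct key) -- per-key scans instead of any incremental dict updates.
import Mathlib
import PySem

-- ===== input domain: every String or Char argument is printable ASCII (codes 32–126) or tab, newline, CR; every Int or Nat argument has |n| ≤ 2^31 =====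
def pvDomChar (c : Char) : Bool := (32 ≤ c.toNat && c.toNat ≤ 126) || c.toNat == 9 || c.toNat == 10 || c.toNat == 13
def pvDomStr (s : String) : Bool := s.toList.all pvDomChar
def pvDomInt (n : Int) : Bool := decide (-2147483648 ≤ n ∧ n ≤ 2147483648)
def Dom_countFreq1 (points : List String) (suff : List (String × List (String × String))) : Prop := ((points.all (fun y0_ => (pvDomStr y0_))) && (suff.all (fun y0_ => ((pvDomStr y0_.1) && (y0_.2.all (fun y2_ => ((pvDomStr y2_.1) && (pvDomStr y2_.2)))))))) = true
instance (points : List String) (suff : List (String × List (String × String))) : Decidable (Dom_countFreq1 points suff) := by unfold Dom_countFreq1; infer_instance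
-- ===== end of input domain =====

-- B replaces A's single-pass dict maintenance by a staged algorithm: a values list, a dedup
-- for key order, then per-key rescans (count / filter) — alternative decomposition, not faster.

-- ===== PORT A =====
-- one loop iteration of A: look up suff[p], take its first key k, v = suff[p][k],
-- then either bump the counter and append, or start both entries
def aStep (suff : List (String × List (String × String)))
    (acc : PySem.Dict String Int × PySem.Dict String (List String)) (p : String) :
    PySem.Dict String Int × PySem.Dict String (List String) :=
  let sp := PySem.Dict.mk ((PySem.Dict.mk suff).getD p [])   -- suff[p]  (KeyError excluded by Pre_)
  let k := sp.keys.headD ""                                  -- list(suff[p].keys())[0]  (IndexError excluded by Pre_)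
  let v := sp.getD k ""                                      -- suff[p][k]
  if acc.1.contains v then
    (acc.1.modify v 0 (· + 1), acc.2.modify v [] (· ++ [p])) -- d1[v]+=1; d2[v].append(p)
  else
    (acc.1.insert v 1, acc.2.insert v [p])                   -- d1[v]=1; d2[v]=[p]

def countFreq1 (points : List String) (suff : List (String × List (String × String))) : (List (String × Int)) × (List (String × List String)) :=
  let r := points.foldl (aStep suff) (PySem.Dict.empty, PySem.Dict.empty)
  (r.1.items, r.2.items)

-- ===== PORT B =====
-- Source B: suff[p][list(suff[p].keys())[0]]
def bVal (suff : List (String × List (String × String))) (p : String) : String :=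
  let sp := PySem.Dict.mk ((PySem.Dict.mk suff).getD p [])
  sp.getD (sp.keys.headD "") ""

def countFreq1_alt (points : List String) (suff : List (String × List (String × String))) : (List (String × Int)) × (List (String × List String)) :=
  let vals := points.map (bVal suff)                         -- vals = [… for p in points]
  let order := PySem.List.dedup vals                         -- list(dict.fromkeys(vals))
  (order.map (fun v => (v, (vals.count v : Int))),           -- {v: vals.count(v) for v in order}
   order.map (fun v => (v, ((points.zip vals).filter (fun q => q.2 == v)).map Prod.fst)))
                                                             -- {v: [p for p, w in zip(points, vals) if w == v] for v in order}

-- ===== PRECONDITION & SPEC =====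
-- Pre_ excludes exactly the inputs on which Python A raises: a point p missing from suff
-- (KeyError) or with an empty dict suff[p] (IndexError on list(keys())[0]).
def Pre_countFreq1 (points : List String) (suff : List (String × List (String × String))) : Prop :=
  (points.all (fun p => !((PySem.Dict.mk suff).getD p []).isEmpty)) = true
instance (points : List String) (suff : List (String × List (String × String))) : Decidable (Pre_countFreq1 points suff) := by unfold Pre_countFreq1; infer_instance

def pvWitness_countFreq1 : List String × (List (String × List (String × String))) :=
  (["a", "b", "a"], [("a", [("x", "u")]), ("b", [("y", "u"), ("z", "w")])])

def Spec_countFreq1 (points : List String) (suff : List (String × List (String × String))) (out : (List (String × Int)) × (List (String × List String))) : Prop := out = countFreq1_alt points suff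
instance (points : List String) (suff : List (String × List (String × String))) (out : (List (String × Int)) × (List (String × List String))) : Decidable (Spec_countFreq1 points suff out) := by unfold Spec_countFreq1; infer_instance

-- ===== CLAIM (what is proved, stated in full; the proofs are below) =====
def Claim_equal_countFreq1 : Prop := ∀ (points : List String) (suff : List (String × List (String × String))), Dom_countFreq1 points suff → Pre_countFreq1 points suff → Spec_countFreq1 points suff (countFreq1 points suff)

-- ===== LEMMAS AND PROOFS =====

-- both branches of A's step are the same uniform modify, provided d1 and d2 know the same keys
theorem astep_collapse (suff : List (String × List (String × String))) (p : String)
    (acc : PySem.Dict String Int × PySem.Dict String (List String))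
    (h : acc.1.contains (bVal suff p) = acc.2.contains (bVal suff p)) :
    aStep suff acc p
      = (acc.1.modify (bVal suff p) 0 (· + 1), acc.2.modify (bVal suff p) [] (· ++ [p])) := by
  show (if acc.1.contains (bVal suff p) then _ else _) = _
  by_cases hc : acc.1.contains (bVal suff p)
  · rw [if_pos hc]; rfl
  · rw [if_neg hc]
    have h1 : acc.1.contains (bVal suff p) = false := by simpa using hc
    have h2 : acc.2.contains (bVal suff p) = false := by rw [← h]; exact h1
    refine Prod.ext ?_ ?_
    · show acc.1.insert (bVal suff p) 1
        = acc.1.insert (bVal suff p) (acc.1.getD (bVal suff p) 0 + 1)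
      rw [PySem.Dict.getD_of_not_contains acc.1 0 h1]; norm_num
    · show acc.2.insert (bVal suff p) [p]
        = acc.2.insert (bVal suff p) (acc.2.getD (bVal suff p) [] ++ [p])
      rw [PySem.Dict.getD_of_not_contains acc.2 [] h2]; rfl

-- A's paired fold splits into the two uniform modify folds
theorem fold_split (suff : List (String × List (String × String))) (points : List String) :
    ∀ (d1 : PySem.Dict String Int) (d2 : PySem.Dict String (List String)),
      (∀ v, d1.contains v = d2.contains v) →
      points.foldl (aStep suff) (d1, d2)
        = (points.foldl (fun d p => d.modify (bVal suff p) 0 (· + 1)) d1,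
           points.foldl (fun d p => d.modify (bVal suff p) [] (· ++ [p])) d2) := by
  induction points with
  | nil => intro d1 d2 _; rfl
  | cons p t ih =>
    intro d1 d2 h
    simp only [List.foldl_cons]
    rw [astep_collapse suff p (d1, d2) (h _)]
    exact ih _ _ (fun v => by
      rw [PySem.Dict.contains_modify, PySem.Dict.contains_modify, h v])

-- zip points (points.map f) is the graph of f
theorem zip_self_map {α β : Type} (f : α → β) (l : List α) :
    l.zip (l.map f) = l.map (fun x => (x, f x)) := by
  induction l with
  | nil => rfl
  | cons x t ih => simp [ih]

-- ===== VERDICT (by name: the statement is the Claim_ definition above) =====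
theorem countFreq1_spec : Claim_equal_countFreq1 := by
  intro points suff _ _
  show countFreq1 points suff = countFreq1_alt points suff
  have hsplit := fold_split suff points PySem.Dict.empty PySem.Dict.empty (fun v => rfl)
  show ((points.foldl (aStep suff) (PySem.Dict.empty, PySem.Dict.empty)).1.items,
        (points.foldl (aStep suff) (PySem.Dict.empty, PySem.Dict.empty)).2.items) = _
  rw [hsplit]
  refine Prod.ext ?_ ?_ <;> dsimp only
  · -- d1: the counter fold is Counter(vals)
    rw [← List.foldl_map (f := bVal suff) (g := fun d x => PySem.Dict.modify d x 0 (· + 1))]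
    rw [← PySem.Dict.counter_eq_foldl, PySem.Dict.items_counter]
    simp [countFreq1_alt]
  · -- d2: the grouping fold, read off key by key
    set D := points.foldl (fun d p => d.modify (bVal suff p) [] (· ++ [p])) PySem.Dict.empty with hD
    have hkeys : D.keys = PySem.Set.ofList (points.map (bVal suff)) := by
      rw [hD, PySem.Dict.keys_foldl_modify_key]
      rfl
    have hnd : D.keys.Nodup := by
      rw [hkeys]; exact PySem.Set.nodup_ofList _
    rw [PySem.Dict.items_eq_map_keys D hnd [], hkeys]
    show _ = (PySem.List.dedup (points.map (bVal suff))).map _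
    rw [PySem.List.dedup_eq_ofList]
    apply List.map_congr_left
    intro v _
    refine Prod.ext rfl ?_
    show D.getD v [] = ((points.zip (points.map (bVal suff))).filter (fun q => q.2 == v)).map Prod.fst
    have hfold : D = (points.map (fun p => (bVal suff p, p))).foldl
        (fun d q => d.modify q.1 [] (· ++ [q.2])) PySem.Dict.empty := by
      rw [hD, List.foldl_map]
    rw [hfold, PySem.Dict.getD_foldl_modify_append, zip_self_map]
    simp [List.filter_map, Function.comp_def, List.map_map]
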